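-- pv_equiv track=rewrite | github.com/wu709621493/bootcamp | modules/jb_bootcamp/jb_bootcamp/boss.py | normalize_chart
-- ===== SOURCE A (Python) =====
-- from typing import Dict, Iterable, Mapping, Optional, Set
--
-- def normalize_chart(pairs: Iterable[tuple[str, Optional[str]]]) -> Dict[str, Optional[str]]:
--     """Return a validated boss chart from ``pairs``.
--
--     Each element of ``pairs`` is a two-tuple ``(employee, boss)`` where ``boss``
--     may be ``None`` for a top-level leader.  The function ensures employees are
--     unique, that a person is not listed as their own boss, and that the overall
--     structure is acyclic.  A ``ValueError`` is raised if any rule is violated.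
--     """
--
--     chart: Dict[str, Optional[str]] = {}
--     for employee, boss in pairs:
--         if not employee:
--             raise ValueError("Employee names must be non-empty strings.")
--         if employee == boss:
--             raise ValueError(f"{employee!r} cannot be their own boss.")
--         if employee in chart:
--             raise ValueError(f"{employee!r} is already listed in the chart.")
--         chart[employee] = boss
--
--     _ensure_acyclic(chart)
--     return chart
--
-- def _ensure_acyclic(chart: Mapping[str, Optional[str]]) -> None:
--     """Raise ``ValueError`` if *chart* contains a reporting loop."""
--
--     visiting: Set[str] = set()
--     visited: Set[str] = set()
--
--     def walk(employee: str) -> None: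
--         if employee in visited:
--             return
--         if employee in visiting:
--             raise ValueError("A reporting cycle was detected in the chart.")
--
--         visiting.add(employee)
--         boss = chart.get(employee)
--         if boss is not None:
--             walk(boss)
--         visiting.remove(employee)
--         visited.add(employee)
--
--     for name in chart:
--         walk(name)
-- ===== SOURCE B (Python) =====
-- from typing import Dict, Iterable, Optional
--
-- def normalize_chart(pairs: Iterable[tuple[str, Optional[str]]]) -> Dict[str, Optional[str]]:
--     pairs = list(pairs)
--     names = [employee for employee, _ in pairs]
--     if any(not name for name in names):
--         raise ValueError("Employee names must be non-empty strings.")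
--     if any(boss == employee for employee, boss in pairs):
--         raise ValueError("An employee cannot be their own boss.")
--     if len(set(names)) != len(names):
--         raise ValueError("Duplicate employee in the chart.")
--     chart: Dict[str, Optional[str]] = dict(pairs)
--     safe: set[str] = set()
--     for name in chart:
--         path: set[str] = set()
--         current = name
--         while current not in safe:
--             if current in path:
--                 raise ValueError("A reporting cycle was detected in the chart.")
--             path.add(current)
--             boss = chart.get(current)
--             if boss is None:
--                 break
--             current = boss
--         safe.update(path)
--     return chart
-- ===== Notes on version B (the rewrite author's own statement) =====
-- stated objective: alternative
-- what changed: Validation becomes three whole-list checks plus dict(pairs) instead of an incremental checking loop, and the recursive visiting/visited DFS of _ensure_acyclic becomes an iterative chain-follower with a global 'safe' set and a per-start local path set.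
import Mathlib
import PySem

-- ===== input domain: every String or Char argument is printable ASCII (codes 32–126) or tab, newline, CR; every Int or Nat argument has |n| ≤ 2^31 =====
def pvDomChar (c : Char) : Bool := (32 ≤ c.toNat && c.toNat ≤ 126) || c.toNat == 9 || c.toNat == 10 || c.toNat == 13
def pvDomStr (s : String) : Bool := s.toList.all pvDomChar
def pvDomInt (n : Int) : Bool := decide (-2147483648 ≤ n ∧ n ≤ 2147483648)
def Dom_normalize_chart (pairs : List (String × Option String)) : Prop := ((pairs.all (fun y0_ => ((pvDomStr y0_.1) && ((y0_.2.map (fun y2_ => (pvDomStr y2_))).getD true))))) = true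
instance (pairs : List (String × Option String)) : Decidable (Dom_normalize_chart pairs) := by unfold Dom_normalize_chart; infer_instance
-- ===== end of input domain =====

-- B replaces A's incremental validation loop by whole-list checks plus dict(pairs), and
-- replaces the recursive visiting/visited DFS of _ensure_acyclic by an iterative
-- chain-follower with a global 'safe' set (objective: alternative decomposition;
-- equivalence of the RETURN value on Pre_, where neither raises).

-- ===== PORT A =====
-- the chart-building loop of A: `none` = one of the three ValueErrors was raised
def pvBuildA : List (String × Option String) → PySem.Dict String (Option String) →
    Option (PySem.Dict String (Option String))
  | [], chart => some chart
  | (employee, boss) :: rest, chart =>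
    if employee = "" then none                     -- "Employee names must be non-empty strings."
    else if boss = some employee then none         -- "… cannot be their own boss."  (str == Optional[str])
    else if chart.contains employee then none      -- "… is already listed in the chart."
    else pvBuildA rest (chart.insert employee boss)

-- `walk` of _ensure_acyclic; fuel only makes the recursion total (Python recursion has no
-- fuel, but the visiting-set raise bounds its depth by the key count, so fuel keys+1 is
-- never exhausted where the Python returns). `none` = ValueError (cycle); on success
-- returns the updated (visiting, visited) pair.
def pvWalkA (chart : PySem.Dict String (Option String)) :
    Nat → String → PySem.Set String → PySem.Set String →
    Option (PySem.Set String × PySem.Set String)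
  | 0, _, _, _ => none
  | fuel + 1, employee, visiting, visited =>
    if PySem.Set.contains visited employee then some (visiting, visited)
    else if PySem.Set.contains visiting employee then none   -- "A reporting cycle was detected…"
    else
      let visiting' := PySem.Set.add visiting employee
      match chart.get? employee with                          -- boss = chart.get(employee)
      | some (some boss) =>                                   -- boss is not None → walk(boss)
        match pvWalkA chart fuel boss visiting' visited with
        | none => none
        | some st =>
          match PySem.Set.remove? st.1 employee with          -- visiting.remove(employee)
          | none => none
          | some v => some (v, PySem.Set.add st.2 employee)   -- visited.add(employee)
      | _ =>
        match PySem.Set.remove? visiting' employee with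
        | none => none
        | some v => some (v, PySem.Set.add visited employee)

def normalize_chart (pairs : List (String × Option String)) : List (String × Option String) :=
  match pvBuildA pairs PySem.Dict.empty with
  | none => []                                               -- A raised; value unclaimed (outside Pre_)
  | some chart =>
    -- _ensure_acyclic: for name in chart: walk(name)
    match chart.keys.foldl
        (fun st name =>
          match st with
          | none => none
          | some (vg, vd) => pvWalkA chart (chart.keys.length + 1) name vg vd)
        (some ((PySem.Set.empty : PySem.Set String), (PySem.Set.empty : PySem.Set String))) with
    | none => []                                             -- cycle ValueError (outside Pre_)
    | some _ => chart.items

-- ===== PORT B =====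
-- the while-loop of Source B: `none` = cycle ValueError; on success returns the local path set.
-- fuel only makes the loop total: each iteration adds a fresh node to path, so keys+1 bounds it.
def pvWalkB (chart : PySem.Dict String (Option String)) :
    Nat → String → PySem.Set String → PySem.Set String → Option (PySem.Set String)
  | 0, _, _, _ => none
  | fuel + 1, current, safe, path =>
    if PySem.Set.contains safe current then some path         -- while condition fails → exit loop
    else if PySem.Set.contains path current then none         -- "A reporting cycle was detected…"
    else
      let path' := PySem.Set.add path current
      match chart.get? current with                           -- boss = chart.get(current)
      | some (some boss) => pvWalkB chart fuel boss safe path'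
      | _ => some path'                                       -- boss is None → break

def normalize_chart_alt (pairs : List (String × Option String)) : List (String × Option String) :=
  let names := pairs.map Prod.fst
  if pairs.any (fun p => p.1 = "") then []                    -- raise: empty name
  else if pairs.any (fun p => p.2 = some p.1) then []         -- raise: own boss
  else if PySem.Set.len (PySem.Set.ofList names) ≠ PySem.List.len names then []  -- raise: duplicate
  else
    let chart := pairs.foldl (fun d p => d.insert p.1 p.2) PySem.Dict.empty      -- dict(pairs)
    match chart.keys.foldl
        (fun st name =>
          match st with
          | none => none
          | some safe =>
            (pvWalkB chart (chart.keys.length + 1) name safe PySem.Set.empty).map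
              (fun path => PySem.Set.update safe path))       -- safe.update(path)
        (some (PySem.Set.empty : PySem.Set String)) with
    | none => []                                              -- cycle ValueError (outside Pre_)
    | some _ => chart.items

-- ===== PRECONDITION & SPEC =====
-- Helpers for Pre_ (independent of both ports): one step up the boss chain via the
-- standard first-match association-list lookup, lifted to Option for iteration.
def pvStep (pairs : List (String × Option String)) (s : String) : Option String :=
  (pairs.lookup s).bind id

def pvBossStep (pairs : List (String × Option String)) : Option String → Option String :=
  fun o => o.bind (pvStep pairs)

-- Pre_: exactly the inputs where A returns (no ValueError): non-empty distinct employee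
-- names, nobody their own boss, and every boss chain dies out (reaches a name that is no
-- key, or a None boss) — for a functional graph the chain from any node either repeats a
-- node (a cycle, A raises) or escapes within (number of keys)+1 steps, so the bounded
-- chain condition is the standard decidable statement of acyclicity, not a re-run of
-- either port.
def Pre_normalize_chart (pairs : List (String × Option String)) : Prop :=
  (pairs.map Prod.fst).Nodup ∧
  (∀ p ∈ pairs, p.1 ≠ "" ∧ p.2 ≠ some p.1) ∧
  (∀ p ∈ pairs, (pvBossStep pairs)^[pairs.length + 1] (some p.1) = none)

instance (pairs : List (String × Option String)) : Decidable (Pre_normalize_chart pairs) := by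
  unfold Pre_normalize_chart; infer_instance

def pvWitness_normalize_chart : (List (String × Option String)) :=
  [("amy", none), ("bob", some "amy"), ("cat", some "bob"), ("dan", some "eve")]

def Spec_normalize_chart (pairs : List (String × Option String)) (out : List (String × Option String)) : Prop := out = normalize_chart_alt pairs
instance (pairs : List (String × Option String)) (out : List (String × Option String)) : Decidable (Spec_normalize_chart pairs out) := by unfold Spec_normalize_chart; infer_instance

-- ===== CLAIM (what is proved, stated in full; the proofs are below) =====
def Claim_equal_normalize_chart : Prop := ∀ (pairs : List (String × Option String)), Dom_normalize_chart pairs → Pre_normalize_chart pairs → Spec_normalize_chart pairs (normalize_chart pairs)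

-- ===== LEMMAS AND PROOFS =====

-- chain arithmetic -----------------------------------------------------------
theorem pvBossStep_none (pairs : List (String × Option String)) (n : Nat) :
    (pvBossStep pairs)^[n] none = none := by
  induction n with
  | zero => rfl
  | succ n ih => rw [Function.iterate_succ_apply]; exact ih

-- if the chain returns to e, it never dies: termination forces a simple path
theorem pvIter_periodic (pairs : List (String × Option String)) (e : String) (p : Nat)
    (hp : 0 < p) (h : (pvBossStep pairs)^[p] (some e) = some e) :
    ∀ n, (pvBossStep pairs)^[n] (some e) ≠ none := by
  intro n
  induction n using Nat.strong_induction_on with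
  | _ n ih =>
    by_cases hle : n ≤ p
    · intro hnone
      have h2 : (pvBossStep pairs)^[(p - n) + n] (some e) = none := by
        rw [Function.iterate_add_apply, hnone]
        exact pvBossStep_none pairs (p - n)
      rw [show p - n + n = p by omega, h] at h2
      simp at h2
    · have h2 : (pvBossStep pairs)^[(n - p) + p] (some e) =
          (pvBossStep pairs)^[n - p] (some e) := by
        rw [Function.iterate_add_apply, h]
      rw [show n = (n - p) + p by omega, h2]
      exact ih (n - p) (by omega)

theorem pv_no_return (pairs : List (String × Option String)) (e b : String) (k fuel : Nat)
    (hstep : pvStep pairs e = some b) (hk : (pvBossStep pairs)^[k] (some b) = some e)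
    (hterm : (pvBossStep pairs)^[fuel] (some e) = none) : False := by
  have h1 : (pvBossStep pairs)^[k + 1] (some e) = some e := by
    rw [Function.iterate_succ_apply]
    show (pvBossStep pairs)^[k] ((some e).bind (pvStep pairs)) = some e
    rw [Option.bind_some, hstep]; exact hk
  exact pvIter_periodic pairs e (k + 1) (by omega) h1 fuel hterm

theorem pvIter_succ_of_step (pairs : List (String × Option String)) (e b : String) (n : Nat)
    (hstep : pvStep pairs e = some b) :
    (pvBossStep pairs)^[n + 1] (some e) = (pvBossStep pairs)^[n] (some b) := by
  rw [Function.iterate_succ_apply]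
  show (pvBossStep pairs)^[n] ((some e).bind (pvStep pairs)) = _
  rw [Option.bind_some, hstep]

-- Set facts used by the walks ------------------------------------------------
theorem pvSet_contains_iff (s : PySem.Set String) (x : String) :
    PySem.Set.contains s x = true ↔ x ∈ s := by
  simp [PySem.Set.contains]

theorem pvSet_remove_add (s : PySem.Set String) (x : String) (h : x ∉ s) :
    PySem.Set.remove? (PySem.Set.add s x) x = some s := by
  simp [PySem.Set.remove?, PySem.Set.add, PySem.Set.contains, PySem.Set.discard, h]
  intro a ha e; exact h (e ▸ ha)

theorem pvSet_mem_add (s : PySem.Set String) (x y : String) :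
    y ∈ PySem.Set.add s x ↔ y ∈ s ∨ y = x := by
  simp [PySem.Set.add]
  split
  · rename_i hc
    constructor
    · exact Or.inl
    · rintro (h | rfl)
      · exact h
      · simpa [PySem.Set.contains] using hc
  · simp

-- the chart both ports build -------------------------------------------------
theorem pvGet_mk_eq_lookup (l : List (String × Option String)) (s : String) :
    (PySem.Dict.mk l).get? s = l.lookup s := by
  induction l with
  | nil => rfl
  | cons p rest ih =>
    obtain ⟨e, b⟩ := p
    rw [List.lookup_cons, PySem.Dict.get?_mk_cons]
    by_cases h : e = s
    · simp [h]
    · have hb : (s == e) = false := by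
        rw [beq_eq_false_iff_ne]; exact fun hc => h hc.symm
      simp [h, ih, hb]

theorem pvBuildA_ok (l : List (String × Option String)) (d : PySem.Dict String (Option String))
    (hnd : (l.map Prod.fst).Nodup)
    (hok : ∀ p ∈ l, p.1 ≠ "" ∧ p.2 ≠ some p.1)
    (hfresh : ∀ p ∈ l, d.contains p.1 = false) :
    pvBuildA l d = some (PySem.Dict.mk (d.items ++ l)) := by
  induction l generalizing d with
  | nil => simp [pvBuildA]
  | cons p rest ih =>
    obtain ⟨e, b⟩ := p
    have he := hok (e, b) (by simp)
    have hf := hfresh (e, b) (by simp)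
    simp only [List.map_cons, List.nodup_cons] at hnd
    rw [pvBuildA]
    simp only [he.1, he.2, hf, Bool.false_eq_true, ↓reduceIte]
    have hfresh' : ∀ q ∈ rest, (d.insert e b).contains q.1 = false := by
      intro q hq
      rw [PySem.Dict.contains_insert]
      have hne : q.1 ≠ e := by
        intro hqe
        exact hnd.1 (hqe ▸ List.mem_map_of_mem hq)
      simp [hne, hfresh q (List.mem_cons_of_mem _ hq)]
    rw [ih (d.insert e b) hnd.2 (fun q hq => hok q (List.mem_cons_of_mem _ hq)) hfresh']
    rw [PySem.Dict.items_insert_of_not_contains _ _ hf]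
    simp

-- walk of port A succeeds and restores `visiting` exactly, given a dying chain ----
theorem pvWalkA_ok (pairs : List (String × Option String)) (fuel : Nat) :
    ∀ (e : String) (vg vd : PySem.Set String),
    (pvBossStep pairs)^[fuel] (some e) = none →
    (∀ k x, (pvBossStep pairs)^[k] (some e) = some x → x ∉ vg) →
    ∃ vd', pvWalkA (PySem.Dict.mk pairs) fuel e vg vd = some (vg, vd') := by
  induction fuel with
  | zero => intro e vg vd hterm _; exact absurd hterm (by simp)
  | succ fuel ih =>
    intro e vg vd hterm hdisj
    have hnotvg : e ∉ vg := hdisj 0 e (by simp)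
    rw [pvWalkA]
    by_cases hvd : PySem.Set.contains vd e = true
    · exact ⟨vd, by rw [if_pos hvd]⟩
    · rw [if_neg hvd]
      have hvg : ¬ PySem.Set.contains vg e = true := by
        intro hc; exact hnotvg ((pvSet_contains_iff vg e).1 hc)
      rw [if_neg hvg]
      rw [pvGet_mk_eq_lookup]
      cases hstep : pvStep pairs e with
      | none =>
        refine ⟨PySem.Set.add vd e, ?_⟩
        have : pairs.lookup e = none ∨ pairs.lookup e = some none := by
          rw [pvStep] at hstep
          cases h : pairs.lookup e with
          | none => exact Or.inl rfl
          | some ob => cases ob with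
            | none => exact Or.inr rfl
            | some b => rw [h] at hstep; exact absurd hstep (by simp)
        rcases this with h | h <;>
          simp [h, pvSet_remove_add vg e hnotvg]
      | some b =>
        have hterm' : (pvBossStep pairs)^[fuel] (some b) = none := by
          rw [← pvIter_succ_of_step pairs e b fuel hstep]; exact hterm
        have hlk : pairs.lookup e = some (some b) := by
          rw [pvStep] at hstep
          cases h : pairs.lookup e with
          | none => rw [h] at hstep; exact absurd hstep (by simp)
          | some ob => cases ob with
            | none => rw [h] at hstep; exact absurd hstep (by simp)
            | some c => rw [h] at hstep; simpa [h] using hstep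
        have hdisj' : ∀ k x, (pvBossStep pairs)^[k] (some b) = some x →
            x ∉ PySem.Set.add vg e := by
          intro k x hx hmem
          rcases (pvSet_mem_add vg e x).1 hmem with hvgm | rfl
          · exact hdisj (k + 1) x (by rw [pvIter_succ_of_step pairs e b k hstep]; exact hx) hvgm
          · exact pv_no_return pairs x b k (fuel + 1) hstep hx hterm
        obtain ⟨vd', hrec⟩ := ih b (PySem.Set.add vg e) vd hterm' hdisj'
        refine ⟨PySem.Set.add vd' e, ?_⟩
        simp [hlk, hrec, pvSet_remove_add vg e hnotvg]

-- the ensure-loop of A succeeds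
theorem pvEnsureA_ok (pairs : List (String × Option String)) (fuel : Nat)
    (hall : ∀ p ∈ pairs, (pvBossStep pairs)^[fuel] (some p.1) = none) :
    ∀ (ks : List String) (vd : PySem.Set String),
    (∀ n ∈ ks, n ∈ pairs.map Prod.fst) →
    ∃ vd', ks.foldl
        (fun st name =>
          match st with
          | none => none
          | some (vg, vd) => pvWalkA (PySem.Dict.mk pairs) fuel name vg vd)
        (some ((PySem.Set.empty : PySem.Set String), vd)) = some (PySem.Set.empty, vd') := by
  intro ks
  induction ks with
  | nil => exact fun vd _ => ⟨vd, rfl⟩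
  | cons n rest ih =>
    intro vd hmem
    have hn : n ∈ pairs.map Prod.fst := hmem n (by simp)
    obtain ⟨p, hp, hp1⟩ := List.mem_map.1 hn
    have hterm : (pvBossStep pairs)^[fuel] (some n) = none := hp1 ▸ hall p hp
    obtain ⟨vd1, h1⟩ := pvWalkA_ok pairs fuel n PySem.Set.empty vd hterm
      (fun k x _ hx => by simp [PySem.Set.empty] at hx)
    rw [List.foldl_cons]
    simp only [h1]
    exact ih vd1 (fun m hm => hmem m (List.mem_cons_of_mem _ hm))

-- walk of port B succeeds, given a dying chain ------------------------------------
theorem pvWalkB_ok (pairs : List (String × Option String)) (fuel : Nat) :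
    ∀ (c : String) (safe path : PySem.Set String),
    (pvBossStep pairs)^[fuel] (some c) = none →
    (∀ k x, (pvBossStep pairs)^[k] (some c) = some x → x ∉ path) →
    ∃ path', pvWalkB (PySem.Dict.mk pairs) fuel c safe path = some path' := by
  induction fuel with
  | zero => intro c safe path hterm _; exact absurd hterm (by simp)
  | succ fuel ih =>
    intro c safe path hterm hdisj
    have hnotp : c ∉ path := hdisj 0 c (by simp)
    rw [pvWalkB]
    by_cases hs : PySem.Set.contains safe c = true
    · exact ⟨path, by rw [if_pos hs]⟩
    · rw [if_neg hs]
      have hp : ¬ PySem.Set.contains path c = true := by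
        intro hc; exact hnotp ((pvSet_contains_iff path c).1 hc)
      rw [if_neg hp]
      rw [pvGet_mk_eq_lookup]
      cases hstep : pvStep pairs c with
      | none =>
        refine ⟨PySem.Set.add path c, ?_⟩
        have : pairs.lookup c = none ∨ pairs.lookup c = some none := by
          rw [pvStep] at hstep
          cases h : pairs.lookup c with
          | none => exact Or.inl rfl
          | some ob => cases ob with
            | none => exact Or.inr rfl
            | some b => rw [h] at hstep; exact absurd hstep (by simp)
        rcases this with h | h <;> simp [h]
      | some b =>
        have hterm' : (pvBossStep pairs)^[fuel] (some b) = none := by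
          rw [← pvIter_succ_of_step pairs c b fuel hstep]; exact hterm
        have hlk : pairs.lookup c = some (some b) := by
          rw [pvStep] at hstep
          cases h : pairs.lookup c with
          | none => rw [h] at hstep; exact absurd hstep (by simp)
          | some ob => cases ob with
            | none => rw [h] at hstep; exact absurd hstep (by simp)
            | some d => rw [h] at hstep; simpa [h] using hstep
        have hdisj' : ∀ k x, (pvBossStep pairs)^[k] (some b) = some x →
            x ∉ PySem.Set.add path c := by
          intro k x hx hmem
          rcases (pvSet_mem_add path c x).1 hmem with hpm | rfl
          · exact hdisj (k + 1) x (by rw [pvIter_succ_of_step pairs c b k hstep]; exact hx) hpm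
          · exact pv_no_return pairs x b k (fuel + 1) hstep hx hterm
        obtain ⟨path', hrec⟩ := ih b safe (PySem.Set.add path c) hterm' hdisj'
        exact ⟨path', by simp [hlk, hrec]⟩

-- the ensure-loop of B succeeds
theorem pvEnsureB_ok (pairs : List (String × Option String)) (fuel : Nat)
    (hall : ∀ p ∈ pairs, (pvBossStep pairs)^[fuel] (some p.1) = none) :
    ∀ (ks : List String) (safe : PySem.Set String),
    (∀ n ∈ ks, n ∈ pairs.map Prod.fst) →
    ∃ safe', ks.foldl
        (fun st name =>
          match st with
          | none => none
          | some safe =>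
            (pvWalkB (PySem.Dict.mk pairs) fuel name safe PySem.Set.empty).map
              (fun path => PySem.Set.update safe path))
        (some safe) = some safe' := by
  intro ks
  induction ks with
  | nil => exact fun safe _ => ⟨safe, rfl⟩
  | cons n rest ih =>
    intro safe hmem
    have hn : n ∈ pairs.map Prod.fst := hmem n (by simp)
    obtain ⟨p, hp, hp1⟩ := List.mem_map.1 hn
    have hterm : (pvBossStep pairs)^[fuel] (some n) = none := hp1 ▸ hall p hp
    obtain ⟨path1, h1⟩ := pvWalkB_ok pairs fuel n safe PySem.Set.empty hterm
      (fun k x _ hx => by simp [PySem.Set.empty] at hx)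
    rw [List.foldl_cons]
    simp only [h1, Option.map_some]
    exact ih (PySem.Set.update safe path1) (fun m hm => hmem m (List.mem_cons_of_mem _ hm))

-- A returns the pairs themselves under Pre_
theorem pvA_eq (pairs : List (String × Option String)) (h : Pre_normalize_chart pairs) :
    normalize_chart pairs = pairs := by
  obtain ⟨hnd, hok, hacy⟩ := h
  rw [normalize_chart]
  rw [pvBuildA_ok pairs PySem.Dict.empty hnd hok (fun p _ => by simp)]
  have hemp : (PySem.Dict.empty : PySem.Dict String (Option String)).items = [] := rfl
  simp only [hemp, List.nil_append]
  have hkeys : (PySem.Dict.mk pairs).keys = pairs.map Prod.fst := by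
    simp [PySem.Dict.keys]
  have hlen : (PySem.Dict.mk pairs).keys.length + 1 = pairs.length + 1 := by
    rw [hkeys]; simp
  obtain ⟨vd', hens⟩ := pvEnsureA_ok pairs (pairs.length + 1) hacy
    ((PySem.Dict.mk pairs).keys) PySem.Set.empty (fun n hn => hkeys ▸ hn)
  rw [hlen, hens]

-- B returns the pairs themselves under Pre_
theorem pvB_eq (pairs : List (String × Option String)) (h : Pre_normalize_chart pairs) :
    normalize_chart_alt pairs = pairs := by
  obtain ⟨hnd, hok, hacy⟩ := h
  have h1 : pairs.any (fun p => p.1 = "") = false := by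
    simp only [List.any_eq_false]
    intro p hp
    simp [(hok p hp).1]
  have h2 : pairs.any (fun p => p.2 = some p.1) = false := by
    simp only [List.any_eq_false]
    intro p hp
    simp [(hok p hp).2]
  have h3 : PySem.Set.ofList (pairs.map Prod.fst) = pairs.map Prod.fst :=
    PySem.Set.ofList_eq_self_of_nodup _ hnd
  have hchart : pairs.foldl (fun d p => d.insert p.1 p.2) PySem.Dict.empty =
      PySem.Dict.mk pairs := by
    apply PySem.Dict.ext
    rw [PySem.Dict.items_foldl_insert_fresh pairs Prod.fst Prod.snd PySem.Dict.empty
      (fun p _ => by simp) hnd]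
    simp [show (PySem.Dict.empty : PySem.Dict String (Option String)).items = [] from rfl]
  rw [normalize_chart_alt]
  simp only [h1, h2, Bool.false_eq_true, if_false]
  rw [if_neg (by simp [h3, PySem.Set.len, PySem.List.len])]
  rw [hchart]
  have hkeys : (PySem.Dict.mk pairs).keys = pairs.map Prod.fst := by
    simp [PySem.Dict.keys]
  have hlen : (PySem.Dict.mk pairs).keys.length + 1 = pairs.length + 1 := by
    rw [hkeys]; simp
  obtain ⟨safe', hens⟩ := pvEnsureB_ok pairs (pairs.length + 1) hacy
    ((PySem.Dict.mk pairs).keys) PySem.Set.empty (fun n hn => hkeys ▸ hn)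
  rw [hlen, hens]

-- ===== VERDICT (by name: the statement is the Claim_ definition above) =====
theorem normalize_chart_spec : Claim_equal_normalize_chart := by
  intro pairs _ hpre
  unfold Spec_normalize_chart
  rw [pvA_eq pairs hpre, pvB_eq pairs hpre]
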